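-- pv_equiv track=rewrite | github.com/Arsen1302/Code-copy-detector | TestData/solutions/problem_1488_4.py | solution_1488_4
-- ===== SOURCE A (Python) =====
-- def solution_1488_4(num: int) -> int:
--
--     # no digits contained, can return zero
--     if not num:
--         return 0
--
--     # make an array to count the digits
--     digits = [0]*10
--
--     # check whether number is negative
--     negative = num < 0
--     num = abs(num)
--
--     # find the digits and the smallest number not beeing zero
--     # if we have a positive number (no leading zeros)
--     starting_number = 9
--     while num:
--         # get the digits
--         num, res = divmod(num, 10)
--
--         # track digit frequency
--         digits[res] += 1
--
--         # save the smallest number in case we have a positive number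
--         if not negative and res:
--             starting_number = min(starting_number, res)
--
--     # initialize the result (for positive numbers we already put the smallest number)
--     result = 0
--     if not negative:
--         result = starting_number
--         digits[starting_number] -= 1
--
--     if negative:
--
--         # go through the numbers in reverse and attach them
--         for index, amount in enumerate(reversed(digits)):
--
--             # attach the digit amount times
--             while amount:
--                 result = result*10 - (9-index)
--                 amount -= 1
--
--     else:
--
--         # go through the numbers and attach them
--         for index, amount in enumerate(digits):
--
--             # attach the digit amount times
--             while amount:
--                 result = result*10 + index
--                 amount -= 1
--
--     return result
-- ===== SOURCE B (Python) =====
-- def solution_1488_4(num: int) -> int: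
--     # sort the extracted digits instead of keeping a frequency table
--     if num == 0:
--         return 0
--     n = abs(num)
--     ds = []
--     while n:
--         n, d = divmod(n, 10)
--         ds.append(d)
--     ds.sort()
--     if num < 0:
--         # most negative: digits in descending order
--         ds.reverse()
--         v = 0
--         for d in ds:
--             v = v * 10 + d
--         return -v
--     # smallest positive: move the first (= smallest) nonzero digit to the front
--     i = next(j for j, d in enumerate(ds) if d)
--     ds[0], ds[i] = ds[i], ds[0]
--     v = 0
--     for d in ds:
--         v = v * 10 + d
--     return v
-- ===== Notes on version B (the rewrite author's own statement) =====
-- stated objective: alternative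
-- what changed: A counts digit frequencies into a fixed-size table while tracking the minimal nonzero digit, then rebuilds the number with nested per-digit while-loops; B collects the digits into a list, comparison-sorts it, and emits it with a single fold (reversed for negatives, first nonzero digit swapped to the front for positives).
import Mathlib
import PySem

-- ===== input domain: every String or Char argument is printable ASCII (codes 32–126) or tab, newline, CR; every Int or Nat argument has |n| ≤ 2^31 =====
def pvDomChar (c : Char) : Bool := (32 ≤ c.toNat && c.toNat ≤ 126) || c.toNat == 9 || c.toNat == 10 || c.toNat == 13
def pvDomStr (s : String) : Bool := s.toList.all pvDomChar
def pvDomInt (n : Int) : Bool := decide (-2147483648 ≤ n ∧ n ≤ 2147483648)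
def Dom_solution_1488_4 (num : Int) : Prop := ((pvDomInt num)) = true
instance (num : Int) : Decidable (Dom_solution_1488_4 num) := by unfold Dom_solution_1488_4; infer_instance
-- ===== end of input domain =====

-- B replaces A's digit-frequency table and per-digit arithmetic reconstruction by sorting the
-- extracted digit list and emitting it with one fold (objective: alternative algorithm).

-- ===== PORT A =====
-- 'while num:' digit loop; num = abs(original) ≥ 0, so recursing on a Nat is exact
-- (Nat's / and % agree with Python divmod on nonnegative arguments).
-- Digit counts are kept as Nat: each count is 0 before the loop and only incremented,
-- and the single decrement hits the count of a digit that occurred, so no count ever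
-- goes below 0 — Nat arithmetic is exact here.
def pvALoop (n : Nat) (negative : Bool) (digits : List Nat) (starting : Nat) : List Nat × Nat :=
  if n = 0 then (digits, starting)
  else
    pvALoop (n / 10) negative (digits.set (n % 10) (digits.getD (n % 10) 0 + 1))
      (if negative = false ∧ n % 10 ≠ 0 then min starting (n % 10) else starting)
termination_by n
decreasing_by exact Nat.div_lt_self (Nat.pos_of_ne_zero (by assumption)) (by norm_num)

-- 'while amount: result = result*10 + index; amount -= 1'
def pvEmitPos (res : Int) (idx : Nat) : Nat → Int
  | 0 => res
  | a + 1 => pvEmitPos (res * 10 + (idx : Int)) idx a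

-- 'while amount: result = result*10 - (9-index); amount -= 1' (idx here is the value 9-index)
def pvEmitNeg (res : Int) (idx : Nat) : Nat → Int
  | 0 => res
  | a + 1 => pvEmitNeg (res * 10 - (idx : Int)) idx a

def solution_1488_4 (num : Int) : Int :=
  if num = 0 then 0
  else
    let negative := decide (num < 0)
    let p := pvALoop num.natAbs negative (List.replicate 10 0) 9
    let digits := p.1
    let starting := p.2
    if negative then
      -- for index, amount in enumerate(reversed(digits)): element at index i is digits[9-i]
      (List.range 10).foldl (fun res i => pvEmitNeg res (9 - i) (digits.getD (9 - i) 0)) 0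
    else
      let digits1 := digits.set starting (digits.getD starting 0 - 1)
      (List.range 10).foldl (fun res i => pvEmitPos res i (digits1.getD i 0)) (starting : Int)

-- ===== PORT B =====
-- ds.append(d) while n: least-significant digit first
def pvBDigits (n : Nat) : List Nat :=
  if n = 0 then [] else (n % 10) :: pvBDigits (n / 10)
termination_by n
decreasing_by exact Nat.div_lt_self (Nat.pos_of_ne_zero (by assumption)) (by norm_num)

def solution_1488_4_alt (num : Int) : Int :=
  if num = 0 then 0
  else
    let ds := PySem.List.sorted (pvBDigits num.natAbs) (fun x => x) false
    if num < 0 then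
      -- ds.reverse(); v accumulated left to right; return -v
      - ((ds.reverse).foldl (fun (v : Int) (d : Nat) => v * 10 + (d : Int)) 0)
    else
      -- i = first index with a nonzero digit (exists: num ≠ 0); ds[i] is in range, so getD is exact
      let i := ds.findIdx (fun d => d ≠ 0)
      let ds1 := (ds.set 0 (ds.getD i 0)).set i (ds.getD 0 0)
      ds1.foldl (fun (v : Int) (d : Nat) => v * 10 + (d : Int)) 0

-- ===== PRECONDITION & SPEC =====
def Spec_solution_1488_4 (num : Int) (out : Int) : Prop := out = solution_1488_4_alt num
instance (num : Int) (out : Int) : Decidable (Spec_solution_1488_4 num out) := by unfold Spec_solution_1488_4; infer_instance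

-- ===== CLAIM (what is proved, stated in full; the proofs are below) =====
def Claim_equal_solution_1488_4 : Prop := ∀ (num : Int), Dom_solution_1488_4 num → Spec_solution_1488_4 num (solution_1488_4 num)

-- ===== LEMMAS AND PROOFS =====

-- the ascending digit emission as a fold, and the counting-sort flattening
def pvEmitList (res : Int) (l : List Nat) : Int := l.foldl (fun (v : Int) (d : Nat) => v * 10 + (d : Int)) res
def pvEmitListNeg (res : Int) (l : List Nat) : Int := l.foldl (fun (v : Int) (d : Nat) => v * 10 - (d : Int)) res
def pvFlat (c : Nat → Nat) (l : List Nat) : List Nat := l.flatMap (fun i => List.replicate (c i) i)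

theorem pvBDigits_lt_10 (n : Nat) : ∀ d ∈ pvBDigits n, d < 10 := by
  induction n using Nat.strong_induction_on with
  | _ n ih =>
    rw [pvBDigits]
    split
    · simp
    · intro d hd
      rcases List.mem_cons.mp hd with h | h
      · subst h; exact Nat.mod_lt _ (by norm_num)
      · exact ih (n / 10) (Nat.div_lt_self (Nat.pos_of_ne_zero (by assumption)) (by norm_num)) d h

theorem pvBDigits_exists_ne_zero (n : Nat) (hn : n ≠ 0) : ∃ d ∈ pvBDigits n, d ≠ 0 := by
  induction n using Nat.strong_induction_on with
  | _ n ih =>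
    rw [pvBDigits, if_neg hn]
    by_cases h10 : n / 10 = 0
    · refine ⟨n % 10, List.mem_cons_self, ?_⟩
      have := Nat.div_add_mod n 10
      omega
    · obtain ⟨d, hd, hdz⟩ := ih (n / 10)
        (Nat.div_lt_self (Nat.pos_of_ne_zero hn) (by norm_num)) h10
      exact ⟨d, List.mem_cons_of_mem _ hd, hdz⟩

theorem pvALoop_eq (n : Nat) (neg : Bool) (digits : List Nat) (s : Nat) :
    pvALoop n neg digits s =
      ((pvBDigits n).foldl (fun dg r => dg.set r (dg.getD r 0 + 1)) digits,
       (pvBDigits n).foldl (fun a r => if neg = false ∧ r ≠ 0 then min a r else a) s) := by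
  induction n using Nat.strong_induction_on generalizing digits s with
  | _ n ih =>
    rw [pvALoop, pvBDigits]
    by_cases hn : n = 0
    · simp [hn]
    · rw [if_neg hn, if_neg hn, List.foldl_cons, List.foldl_cons]
      exact ih (n / 10) (Nat.div_lt_self (Nat.pos_of_ne_zero hn) (by norm_num)) _ _

-- counting: getD of the incrementing fold is the list count
theorem pvCountFold_length (L : List Nat) (acc : List Nat) :
    (L.foldl (fun dg r => dg.set r (dg.getD r 0 + 1)) acc).length = acc.length := by
  induction L generalizing acc with
  | nil => rfl
  | cons r L ih => rw [List.foldl_cons, ih]; simp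

theorem pvCountFold_getD (L : List Nat) (acc : List Nat)
    (h : ∀ d ∈ L, d < acc.length) (i : Nat) :
    (L.foldl (fun dg r => dg.set r (dg.getD r 0 + 1)) acc).getD i 0 =
      acc.getD i 0 + L.count i := by
  induction L generalizing acc with
  | nil => simp
  | cons r L ih =>
    have hr : r < acc.length := h r List.mem_cons_self
    rw [List.foldl_cons, ih _ (by simpa using fun d hd => h d (List.mem_cons_of_mem _ hd))]
    by_cases hir : i = r
    · subst hir
      simp [List.getD_eq_getElem?_getD, List.getElem?_set_self hr, List.count_cons_self]
      omega
    · simp [List.getD_eq_getElem?_getD, List.getElem?_set_ne (fun h => hir h.symm),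
        List.count_cons]
      omega

-- the min-tracking fold
theorem pvMinFold_le_init (L : List Nat) (a : Nat) :
    L.foldl (fun a r => if r ≠ 0 then min a r else a) a ≤ a := by
  induction L generalizing a with
  | nil => simp
  | cons r L ih =>
    rw [List.foldl_cons]
    split
    · exact le_trans (ih _) (min_le_left _ _)
    · exact ih _

theorem pvMinFold_le (L : List Nat) (a : Nat) :
    ∀ d ∈ L, d ≠ 0 → L.foldl (fun a r => if r ≠ 0 then min a r else a) a ≤ d := by
  induction L generalizing a with
  | nil => simp
  | cons r L ih =>
    intro d hd hdz
    rw [List.foldl_cons]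
    rcases List.mem_cons.mp hd with h | h
    · subst h
      rw [if_pos hdz]
      exact le_trans (pvMinFold_le_init _ _) (min_le_right _ _)
    · exact ih _ d h hdz

theorem pvMinFold_cases (L : List Nat) (a : Nat) :
    L.foldl (fun a r => if r ≠ 0 then min a r else a) a = a ∨
      (L.foldl (fun a r => if r ≠ 0 then min a r else a) a ∈ L ∧
       L.foldl (fun a r => if r ≠ 0 then min a r else a) a ≠ 0) := by
  induction L generalizing a with
  | nil => left; rfl
  | cons r L ih =>
    rw [List.foldl_cons]
    split
    · rcases ih (min a r) with h | h
      · rcases Nat.le_total a r with har | hra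
        · left; rw [h]; omega
        · right
          refine ⟨?_, by omega⟩
          rw [h, min_eq_right hra]
          exact List.mem_cons_self
      · exact Or.inr ⟨List.mem_cons_of_mem _ h.1, h.2⟩
    · rcases ih a with h | h
      · exact Or.inl h
      · exact Or.inr ⟨List.mem_cons_of_mem _ h.1, h.2⟩

-- emission loops as folds over replicate lists, and over the counting-sort flattening
theorem pvEmitPos_eq (idx : Nat) (a : Nat) : ∀ res,
    pvEmitPos res idx a = pvEmitList res (List.replicate a idx) := by
  induction a with
  | zero => intro res; rfl
  | succ a ih => intro res; rw [pvEmitPos, List.replicate_succ]; exact ih _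

theorem pvEmitNeg_eq (idx : Nat) (a : Nat) : ∀ res,
    pvEmitNeg res idx a = pvEmitListNeg res (List.replicate a idx) := by
  induction a with
  | zero => intro res; rfl
  | succ a ih => intro res; rw [pvEmitNeg, List.replicate_succ]; exact ih _

theorem pvEmit_range_flat (c : Nat → Nat) (l : List Nat) : ∀ res,
    l.foldl (fun r i => pvEmitPos r i (c i)) res = pvEmitList res (pvFlat c l) := by
  induction l with
  | nil => intro res; rfl
  | cons i l ih =>
    intro res
    rw [List.foldl_cons, ih, pvEmitPos_eq]
    simp [pvFlat, pvEmitList, List.foldl_append]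

theorem pvEmitNeg_range_flat (c : Nat → Nat) (l : List Nat) : ∀ res,
    l.foldl (fun r i => pvEmitNeg r i (c i)) res = pvEmitListNeg res (pvFlat c l) := by
  induction l with
  | nil => intro res; rfl
  | cons i l ih =>
    intro res
    rw [List.foldl_cons, ih, pvEmitNeg_eq]
    simp [pvFlat, pvEmitListNeg, List.foldl_append]

theorem pvEmitListNeg_neg (l : List Nat) : ∀ r : Int,
    pvEmitListNeg (-r) l = -(pvEmitList r l) := by
  induction l with
  | nil => intro r; rfl
  | cons d l ih =>
    intro r
    rw [pvEmitListNeg, pvEmitList, List.foldl_cons, List.foldl_cons]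
    have : -r * 10 - (d : Int) = -(r * 10 + (d : Int)) := by ring
    rw [this]
    exact ih _

-- the flattening is sorted and is a permutation of the digit list
theorem pvFlat_pairwise (c : Nat → Nat) (l : List Nat) (hl : l.Pairwise (· ≤ ·)) :
    (pvFlat c l).Pairwise (· ≤ ·) := by
  induction l with
  | nil => exact List.Pairwise.nil
  | cons a l ih =>
    rcases List.pairwise_cons.mp hl with ⟨ha, hl'⟩
    rw [pvFlat, List.flatMap_cons]
    rw [List.pairwise_append]
    refine ⟨List.pairwise_replicate.mpr (Or.inr le_rfl), ih hl', ?_⟩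
    intro x hx y hy
    have hxa : x = a := List.eq_of_mem_replicate hx
    subst hxa
    obtain ⟨b, hb, hyb⟩ := List.mem_flatMap.mp hy
    have := List.eq_of_mem_replicate hyb
    subst this
    exact ha _ hb

theorem pvFlat_count_perm (L : List Nat) (h : ∀ d ∈ L, d < 10) :
    (pvFlat (fun i => L.count i) (List.range 10)).Perm L := by
  rw [List.perm_iff_count]
  intro x
  by_cases hx : x < 10
  · rw [pvFlat]
    interval_cases x <;>
      simp [List.range_succ, List.count_append, List.count_replicate]
  · have hxL : L.count x = 0 := List.count_eq_zero.mpr (fun hm => hx (h x hm))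
    rw [hxL, List.count_eq_zero]
    intro hm
    rw [pvFlat] at hm
    obtain ⟨b, hb, hxb⟩ := List.mem_flatMap.mp hm
    have := List.eq_of_mem_replicate hxb
    subst this
    exact hx (List.mem_range.mp hb)

-- congruence for the flattening
theorem pvFlat_congr (c c' : Nat → Nat) (l : List Nat) (h : ∀ i ∈ l, c i = c' i) :
    pvFlat c l = pvFlat c' l := by
  induction l with
  | nil => rfl
  | cons a l ih =>
    rw [pvFlat, pvFlat, List.flatMap_cons, List.flatMap_cons,
      h a List.mem_cons_self]
    congr 1
    simpa [pvFlat] using ih (fun i hi => h i (List.mem_cons_of_mem _ hi))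

-- splitting off the first (= smallest) nonzero digit of the flattening
theorem pvFlat_split (l : List Nat) (c : Nat → Nat) (s : Nat)
    (hp : l.Pairwise (· < ·)) (hs : s ∈ l) (hz : ∀ i ∈ l, i < s → c i = 0)
    (hc : 1 ≤ c s) :
    ∃ t, pvFlat c l = s :: t ∧
      pvFlat (fun i => if i = s then c i - 1 else c i) l = t := by
  induction l with
  | nil => cases hs
  | cons a l ih =>
    rcases List.pairwise_cons.mp hp with ⟨ha, hl'⟩
    by_cases has : a = s
    · subst has
      have hnot : a ∉ l := fun hm => lt_irrefl a (ha a hm)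
      obtain ⟨m, hm⟩ : ∃ m, c a = m + 1 := ⟨c a - 1, by omega⟩
      refine ⟨List.replicate m a ++ pvFlat c l, ?_, ?_⟩
      · rw [pvFlat, List.flatMap_cons, hm, List.replicate_succ]
        simp [pvFlat]
      · rw [pvFlat, List.flatMap_cons]
        have h1 : (if a = a then c a - 1 else c a) = m := by simp [hm]
        rw [h1]
        congr 1
        exact pvFlat_congr _ _ _ (fun i hi => by
          rw [if_neg (fun h => hnot (by rw [← h]; exact hi))])
    · have hsl : s ∈ l := by
        rcases List.mem_cons.mp hs with h | h
        · exact absurd h.symm has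
        · exact h
      have haz : c a = 0 := hz a List.mem_cons_self (ha s hsl)
      obtain ⟨t, ht1, ht2⟩ := ih hl' hsl
        (fun i hi his => hz i (List.mem_cons_of_mem _ hi) his)
      refine ⟨t, ?_, ?_⟩
      · rw [pvFlat, List.flatMap_cons, haz]
        simpa [pvFlat] using ht1
      · rw [pvFlat, List.flatMap_cons, if_neg has, haz]
        simpa [pvFlat] using ht2

-- findIdx over leading zeros
theorem pvFindIdx_repl (k : Nat) (s : Nat) (t : List Nat) (hs : s ≠ 0) :
    (List.replicate k 0 ++ s :: t).findIdx (fun d => d ≠ 0) = k := by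
  induction k with
  | zero => simp [List.findIdx_cons, hs]
  | succ k ih =>
    rw [List.replicate_succ, List.cons_append, List.findIdx_cons]
    simp only [show (decide ((0:Nat) ≠ 0)) = false from rfl, cond_false, ih]

-- setting at the position just past the replicate prefix
theorem pvSet_after_repl (m : Nat) (x : Nat) (l : List Nat) (v : Nat) :
    (List.replicate m x ++ l).set m v = List.replicate m x ++ l.set 0 v := by
  induction m with
  | zero => simp
  | succ m ih => simp [List.replicate_succ, ih]

theorem pvFlat_reverse (c : Nat → Nat) (l : List Nat) :
    pvFlat c l.reverse = (pvFlat c l).reverse := by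
  rw [pvFlat, pvFlat, List.reverse_flatMap]
  simp [Function.comp_def, List.reverse_replicate]

theorem pvReplGetD (i : Nat) : (List.replicate 10 (0 : Nat)).getD i 0 = 0 := by
  rw [List.getD_eq_getElem?_getD, List.getElem?_replicate]
  split <;> rfl

theorem solution_1488_4_spec : Claim_equal_solution_1488_4 := by
  intro num _
  unfold Spec_solution_1488_4 solution_1488_4 solution_1488_4_alt
  by_cases h0 : num = 0
  · simp [h0]
  · rw [if_neg h0, if_neg h0]
    have hnz : num.natAbs ≠ 0 := fun h => h0 (Int.natAbs_eq_zero.mp h)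
    have hlt10 : ∀ d ∈ pvBDigits num.natAbs, d < 10 := pvBDigits_lt_10 num.natAbs
    have hperm := pvFlat_count_perm (pvBDigits num.natAbs) hlt10
    have hpair := pvFlat_pairwise (fun i => (pvBDigits num.natAbs).count i) (List.range 10)
      ((List.pairwise_lt_range).imp le_of_lt)
    have hS : PySem.List.sorted (pvBDigits num.natAbs) (fun x => x) false =
        pvFlat (fun i => (pvBDigits num.natAbs).count i) (List.range 10) :=
      PySem.List.sorted_id_eq_of_perm_of_pairwise _ _ hperm hpair
    have hClen : ((pvBDigits num.natAbs).foldl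
        (fun dg r => dg.set r (dg.getD r 0 + 1))
        ([0, 0, 0, 0, 0, 0, 0, 0, 0, 0] : List Nat)).length = 10 := by
      rw [pvCountFold_length]; rfl
    have hC : ∀ j, ((pvBDigits num.natAbs).foldl
        (fun dg r => dg.set r (dg.getD r 0 + 1))
        ([0, 0, 0, 0, 0, 0, 0, 0, 0, 0] : List Nat)).getD j 0 =
        (pvBDigits num.natAbs).count j := by
      intro j
      rw [show ([0, 0, 0, 0, 0, 0, 0, 0, 0, 0] : List Nat) = List.replicate 10 0 from rfl,
        pvCountFold_getD _ _ (by simpa using hlt10), pvReplGetD]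
      omega
    have hrepl : List.replicate 10 (0 : Nat) = [0, 0, 0, 0, 0, 0, 0, 0, 0, 0] := rfl
    by_cases hneg : num < 0
    · -- negative branch
      have hd : decide (num < 0) = true := by simp [hneg]
      rw [hS]
      simp only [hd, pvALoop_eq, if_true]
      simp only [hrepl, hC]
      rw [if_pos hneg]
      have hmap : (List.range 10).map (fun i => 9 - i) = (List.range 10).reverse := by decide
      have hA : (List.range 10).foldl
            (fun res i => pvEmitNeg res (9 - i) ((pvBDigits num.natAbs).count (9 - i))) 0 =
          pvEmitListNeg 0
            ((pvFlat (fun i => (pvBDigits num.natAbs).count i) (List.range 10)).reverse) := by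
        rw [show (List.range 10).foldl
              (fun res i => pvEmitNeg res (9 - i) ((pvBDigits num.natAbs).count (9 - i))) 0 =
            ((List.range 10).map (fun i => 9 - i)).foldl
              (fun res i => pvEmitNeg res i ((pvBDigits num.natAbs).count i)) 0 from
          (List.foldl_map (f := fun i => 9 - i)
            (g := fun (res : Int) (j : Nat) => pvEmitNeg res j ((pvBDigits num.natAbs).count j))
            (l := List.range 10) (init := 0)).symm, hmap, pvEmitNeg_range_flat, pvFlat_reverse]
      rw [hA, show (0 : Int) = -0 from rfl, pvEmitListNeg_neg]
      rfl
    · -- positive branch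
      have hd : decide (num < 0) = false := by simp [hneg]
      rw [hS]
      simp only [hd, pvALoop_eq, Bool.false_eq_true, if_false]
      rw [if_neg hneg]
      simp only [true_and, hrepl]
      set s := (pvBDigits num.natAbs).foldl (fun a r => if r ≠ 0 then min a r else a) 9 with hsdef
      obtain ⟨d0, hd0L, hd0z⟩ := pvBDigits_exists_ne_zero num.natAbs hnz
      have hsle : ∀ d ∈ pvBDigits num.natAbs, d ≠ 0 → s ≤ d := pvMinFold_le _ 9
      have hsmem : s ∈ pvBDigits num.natAbs ∧ s ≠ 0 := by
        rcases pvMinFold_cases (pvBDigits num.natAbs) 9 with h9 | h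
        · have h1 : s ≤ d0 := hsle d0 hd0L hd0z
          have h2 : d0 < 10 := hlt10 d0 hd0L
          have h3 : d0 = 9 := by rw [← hsdef] at h9; omega
          rw [← hsdef] at h9
          exact ⟨by rw [h9, ← h3]; exact hd0L, by omega⟩
        · rw [← hsdef] at h
          exact ⟨h.1, h.2⟩
      have hs9 : s ≤ 9 := pvMinFold_le_init _ 9
      have hcs : 1 ≤ (pvBDigits num.natAbs).count s := List.count_pos_iff.mpr hsmem.1
      have hr10 : List.range 10 = [0, 1, 2, 3, 4, 5, 6, 7, 8, 9] := by decide
      obtain ⟨t, ht1, ht2⟩ := pvFlat_split [1, 2, 3, 4, 5, 6, 7, 8, 9]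
        (fun i => (pvBDigits num.natAbs).count i) s (by decide)
        (by
          simp only [List.mem_cons, List.not_mem_nil, or_false]
          have := hsmem.2
          omega)
        (by
          intro i hi hilt
          have hi0 : i ≠ 0 := by simp at hi; omega
          refine List.count_eq_zero.mpr (fun hiL => ?_)
          have := hsle i hiL hi0
          omega)
        hcs
      have hsplit : pvFlat (fun i => (pvBDigits num.natAbs).count i) (List.range 10) =
          List.replicate ((pvBDigits num.natAbs).count 0) 0 ++ s :: t := by
        rw [hr10, pvFlat, List.flatMap_cons, ← ht1]
        rfl
      have hg : ∀ i, (((pvBDigits num.natAbs).foldl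
            (fun dg r => dg.set r (dg.getD r 0 + 1))
            ([0, 0, 0, 0, 0, 0, 0, 0, 0, 0] : List Nat)).set s
            (((pvBDigits num.natAbs).foldl
              (fun dg r => dg.set r (dg.getD r 0 + 1))
              ([0, 0, 0, 0, 0, 0, 0, 0, 0, 0] : List Nat)).getD s 0 - 1)).getD i 0 =
          (fun i => if i = s then (pvBDigits num.natAbs).count i - 1
            else (pvBDigits num.natAbs).count i) i := by
        intro i
        by_cases his : i = s
        · subst his
          rw [List.getD_eq_getElem?_getD,
            List.getElem?_set_self (by rw [hClen]; omega : s < _)]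
          simp only [Option.getD_some, hC]
          simp
        · rw [List.getD_eq_getElem?_getD,
            List.getElem?_set_ne (fun h => his h.symm), ← List.getD_eq_getElem?_getD, hC]
          simp [his]
      simp only [hg]
      rw [pvEmit_range_flat]
      have hflat' : pvFlat (fun i => if i = s then (pvBDigits num.natAbs).count i - 1
            else (pvBDigits num.natAbs).count i) (List.range 10) =
          List.replicate ((pvBDigits num.natAbs).count 0) 0 ++ t := by
        rw [hr10, pvFlat, List.flatMap_cons]
        rw [show (if (0 : Nat) = s then (pvBDigits num.natAbs).count 0 - 1
            else (pvBDigits num.natAbs).count 0) = (pvBDigits num.natAbs).count 0 from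
          if_neg (fun h => hsmem.2 h.symm), ← ht2]
        rfl
      rw [hflat', hsplit]
      rw [pvFindIdx_repl _ _ _ hsmem.2]
      have hget : (List.replicate ((pvBDigits num.natAbs).count 0) 0 ++ s :: t).getD
          ((pvBDigits num.natAbs).count 0) 0 = s := by
        rw [List.getD_eq_getElem?_getD, List.getElem?_append_right (by simp),
          List.length_replicate]
        simp
      rw [hget]
      cases hk : (pvBDigits num.natAbs).count 0 with
      | zero =>
        simp [pvEmitList]
      | succ m =>
        have hswap : ((List.replicate (m + 1) 0 ++ s :: t).set 0 s).set (m + 1)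
              ((List.replicate (m + 1) 0 ++ s :: t).getD 0 0) =
            s :: (List.replicate (m + 1) 0 ++ t) := by
          rw [List.replicate_succ, List.cons_append, List.getD_cons_zero,
            List.set_cons_zero, List.set_cons_succ, pvSet_after_repl, List.set_cons_zero]
          rw [List.append_cons, ← List.replicate_succ', List.replicate_succ, List.cons_append]
        rw [hswap]
        simp [pvEmitList]
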